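-- pv_equiv track=rewrite | github.com/akash22gupta/Online-Social-Network-Analysis-IN-PYTHON | a4/classify.py | afinn_sentiment_analysis
-- ===== SOURCE A (Python) =====
-- def afinn_sentiment_analysis(terms, afinn):
--     positives = 0
--     negatives = 0
--     for t in terms:
--         if t in afinn:
--             if afinn[t] > 0:
--                 positives += afinn[t]
--             else:
--                 negatives += -1 * afinn[t]
--     return positives, negatives
-- ===== SOURCE B (Python) =====
-- def afinn_sentiment_analysis(terms, afinn):
--     counts = {}
--     for t in terms:
--         counts[t] = counts.get(t, 0) + 1
--     positives = 0
--     negatives = 0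
--     for word, score in afinn.items():
--         c = counts.get(word, 0)
--         if score > 0:
--             positives += c * score
--         else:
--             negatives += c * -score
--     return positives, negatives
-- ===== Notes on version B (the rewrite author's own statement) =====
-- stated objective: alternative
-- what changed: B inverts the iteration: it builds a frequency table of the terms once and then loops over the AFINN lexicon entries, multiplying each score by the term's occurrence count, instead of A's per-occurrence scan with a lexicon lookup.
import Mathlib
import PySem

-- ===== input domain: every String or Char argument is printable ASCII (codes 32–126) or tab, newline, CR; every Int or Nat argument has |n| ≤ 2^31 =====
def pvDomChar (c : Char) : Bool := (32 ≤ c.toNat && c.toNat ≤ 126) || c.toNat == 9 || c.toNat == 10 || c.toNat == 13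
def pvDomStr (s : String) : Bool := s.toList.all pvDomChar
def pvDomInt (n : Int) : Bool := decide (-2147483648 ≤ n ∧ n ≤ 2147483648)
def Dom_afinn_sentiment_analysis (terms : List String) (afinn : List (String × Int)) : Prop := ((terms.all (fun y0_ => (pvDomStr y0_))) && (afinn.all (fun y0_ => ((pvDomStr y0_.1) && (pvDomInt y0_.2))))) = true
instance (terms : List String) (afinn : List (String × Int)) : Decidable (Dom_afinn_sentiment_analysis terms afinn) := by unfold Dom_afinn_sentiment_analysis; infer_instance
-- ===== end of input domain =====

-- B inverts the iteration: a frequency table of the terms is built once, then ONE pass over the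
-- AFINN lexicon entries multiplies each score by its term's occurrence count (same cost class).

-- ===== PORT A =====
-- A: one pass over terms; per occurrence, look the term up in the afinn dict and add its score
-- to positives (if > 0) or its negation to negatives.
def afinn_sentiment_analysis (terms : List String) (afinn : List (String × Int)) : Int × Int :=
  terms.foldl
    (fun (acc : Int × Int) t =>
      match (PySem.Dict.mk afinn).get? t with
      | some v => if v > 0 then (acc.1 + v, acc.2) else (acc.1, acc.2 + (-1) * v)
      | none => acc)
    (0, 0)

-- ===== PORT B =====
-- 'afinn.items()': under the dict→assoc-list convention (lookup = first match) the dict's items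
-- are the pairs whose key did not occur earlier, in first-occurrence order; on key-distinct
-- lists (every list that encodes a Python dict) this is the list itself. Exact port of d.items().
def pvDictItemsAux : List String → List (String × Int) → List (String × Int)
  | _, [] => []
  | seen, p :: rest =>
      if seen.contains p.1 then pvDictItemsAux seen rest
      else p :: pvDictItemsAux (p.1 :: seen) rest

def pvDictItems (l : List (String × Int)) : List (String × Int) := pvDictItemsAux [] l

-- B: counts[t] = counts.get(t, 0) + 1 over terms, then one pass over afinn.items().
def afinn_sentiment_analysis_alt (terms : List String) (afinn : List (String × Int)) : Int × Int :=
  let counts := terms.foldl (fun d t => d.insert t (d.getD t 0 + 1)) PySem.Dict.empty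
  (pvDictItems afinn).foldl
    (fun (acc : Int × Int) p =>
      let c := counts.getD p.1 0
      if p.2 > 0 then (acc.1 + c * p.2, acc.2) else (acc.1, acc.2 + c * (-p.2)))
    (0, 0)

-- ===== PRECONDITION & SPEC =====
def Spec_afinn_sentiment_analysis (terms : List String) (afinn : List (String × Int)) (out : Int × Int) : Prop := out = afinn_sentiment_analysis_alt terms afinn
instance (terms : List String) (afinn : List (String × Int)) (out : Int × Int) : Decidable (Spec_afinn_sentiment_analysis terms afinn out) := by unfold Spec_afinn_sentiment_analysis; infer_instance

-- ===== CLAIM (what is proved, stated in full; the proofs are below) =====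
def Claim_equal_afinn_sentiment_analysis : Prop := ∀ (terms : List String) (afinn : List (String × Int)), Dom_afinn_sentiment_analysis terms afinn → Spec_afinn_sentiment_analysis terms afinn (afinn_sentiment_analysis terms afinn)

-- ===== LEMMAS AND PROOFS =====

-- per-term positive contribution of one occurrence
def pvGp (afinn : List (String × Int)) (t : String) : Int :=
  match (PySem.Dict.mk afinn).get? t with
  | some v => if v > 0 then v else 0
  | none => 0

-- per-term negative contribution of one occurrence
def pvGn (afinn : List (String × Int)) (t : String) : Int :=
  match (PySem.Dict.mk afinn).get? t with
  | some v => if v > 0 then 0 else -v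
  | none => 0

theorem pvA_eq_sums (terms : List String) (afinn : List (String × Int)) :
    afinn_sentiment_analysis terms afinn =
      ((terms.map (pvGp afinn)).sum, (terms.map (pvGn afinn)).sum) := by
  unfold afinn_sentiment_analysis
  have hf : (fun (acc : Int × Int) t =>
      match (PySem.Dict.mk afinn).get? t with
      | some v => if v > 0 then (acc.1 + v, acc.2) else (acc.1, acc.2 + (-1) * v)
      | none => acc)
      = fun (acc : Int × Int) t => (acc.1 + pvGp afinn t, acc.2 + pvGn afinn t) := by
    funext acc t
    unfold pvGp pvGn
    cases h : (PySem.Dict.mk afinn).get? t with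
    | none => simp
    | some v => by_cases hv : v > 0 <;> simp [hv]
  rw [hf]
  rw [PySem.List.foldl_prod_mk (f := fun a t => a + pvGp afinn t) (g := fun a t => a + pvGn afinn t)]
  rw [PySem.List.foldl_add, PySem.List.foldl_add]
  simp

-- the keys pvDictItemsAux lists are exactly the list's keys not yet seen
theorem pvAux_keys (l : List (String × Int)) (seen : List String) (k : String) :
    k ∈ (pvDictItemsAux seen l).map Prod.fst ↔ (k ∉ seen ∧ k ∈ l.map Prod.fst) := by
  induction l generalizing seen with
  | nil => simp [pvDictItemsAux]
  | cons p rest ih =>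
    rw [pvDictItemsAux]
    by_cases hs : p.1 ∈ seen
    · rw [if_pos (by simpa using hs), ih]
      simp only [List.map_cons, List.mem_cons]
      constructor
      · rintro ⟨h1, h2⟩; exact ⟨h1, Or.inr h2⟩
      · rintro ⟨h1, h2 | h2⟩
        · exact absurd (h2 ▸ hs) h1
        · exact ⟨h1, h2⟩
    · rw [if_neg (by simpa using hs)]
      simp only [List.map_cons, List.mem_cons, ih, List.mem_cons, not_or]
      constructor
      · rintro (rfl | ⟨⟨h1, h2⟩, h3⟩)
        · exact ⟨hs, Or.inl rfl⟩
        · exact ⟨h2, Or.inr h3⟩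
      · rintro ⟨h1, rfl | h2⟩
        · exact Or.inl rfl
        · by_cases hk : k = p.1
          · exact Or.inl hk
          · exact Or.inr ⟨⟨hk, h1⟩, h2⟩

-- every pair pvDictItemsAux lists has an unseen key and is its first-match lookup value
theorem pvAux_get (l : List (String × Int)) (seen : List String) (p : String × Int)
    (hp : p ∈ pvDictItemsAux seen l) :
    p.1 ∉ seen ∧ (PySem.Dict.mk l).get? p.1 = some p.2 := by
  induction l generalizing seen with
  | nil => simp [pvDictItemsAux] at hp
  | cons q rest ih =>
    obtain ⟨qk, qv⟩ := q
    rw [pvDictItemsAux] at hp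
    rw [PySem.Dict.get?_mk_cons]
    by_cases hs : qk ∈ seen
    · rw [if_pos (by simpa using hs)] at hp
      obtain ⟨h1, h2⟩ := ih seen hp
      have hne : qk ≠ p.1 := fun e => h1 (e ▸ hs)
      rw [if_neg (by simpa using hne)]
      exact ⟨h1, h2⟩
    · rw [if_neg (by simpa using hs)] at hp
      rcases List.mem_cons.1 hp with rfl | hmem
      · simp [hs]
      · obtain ⟨h1, h2⟩ := ih (qk :: seen) hmem
        have hne : qk ≠ p.1 := fun e => h1 (by simp [e])
        rw [if_neg (by simpa using hne)]
        exact ⟨fun hc => h1 (List.mem_cons_of_mem _ hc), h2⟩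

-- the keys pvDictItems lists are distinct
theorem pvAux_nodup (l : List (String × Int)) (seen : List String) :
    ((pvDictItemsAux seen l).map Prod.fst).Nodup := by
  induction l generalizing seen with
  | nil => simp [pvDictItemsAux]
  | cons p rest ih =>
    rw [pvDictItemsAux]
    by_cases hs : p.1 ∈ seen
    · rw [if_pos (by simpa using hs)]; exact ih seen
    · rw [if_neg (by simpa using hs)]
      simp only [List.map_cons, List.nodup_cons]
      refine ⟨fun hc => ?_, ih (p.1 :: seen)⟩
      exact ((pvAux_keys rest (p.1 :: seen) p.1).1 hc).1 (by simp)

-- a key absent from pvDictItems is absent from the dict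
theorem pvItems_none (l : List (String × Int)) (k : String)
    (h : k ∉ (pvDictItems l).map Prod.fst) : (PySem.Dict.mk l).get? k = none := by
  rw [PySem.Dict.get?_eq_none_iff_not_mem_keys]
  intro hk
  exact h ((pvAux_keys l [] k).2 ⟨by simp, by simpa using hk⟩)

-- per-occurrence sum of g over terms = count-weighted sum of g over the distinct keys,
-- provided g vanishes off the keys
theorem pvBridge (terms keys : List String) (hnd : keys.Nodup) (g : String → Int)
    (hz : ∀ k, k ∉ keys → g k = 0) :
    (terms.map g).sum = (keys.map (fun k => (terms.count k : Int) * g k)).sum := by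
  classical
  rw [Finset.sum_list_map_count, ← List.sum_toFinset _ hnd]
  have hA : ∑ k ∈ terms.toFinset, (terms.count k) • g k
      = ∑ k ∈ terms.toFinset ∪ keys.toFinset, (terms.count k) • g k :=
    Finset.sum_subset Finset.subset_union_left
      (fun x _ hx => by
        have : x ∉ terms := fun hm => hx (List.mem_toFinset.2 hm)
        simp [List.count_eq_zero_of_not_mem this])
  have hB : ∑ k ∈ keys.toFinset, (terms.count k : Int) * g k
      = ∑ k ∈ terms.toFinset ∪ keys.toFinset, (terms.count k : Int) * g k :=
    Finset.sum_subset Finset.subset_union_right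
      (fun x _ hx => by
        have : x ∉ keys := fun hm => hx (List.mem_toFinset.2 hm)
        simp [hz x this])
  rw [hA, hB]
  exact Finset.sum_congr rfl (fun x _ => by simp)

theorem pvB_eq_sums (terms : List String) (afinn : List (String × Int)) :
    afinn_sentiment_analysis_alt terms afinn =
      (((pvDictItems afinn).map (fun p => (terms.count p.1 : Int) * pvGp afinn p.1)).sum,
       ((pvDictItems afinn).map (fun p => (terms.count p.1 : Int) * pvGn afinn p.1)).sum) := by
  unfold afinn_sentiment_analysis_alt
  have hc : ∀ k, (terms.foldl (fun d t => d.insert t (d.getD t 0 + 1)) PySem.Dict.empty).getD k 0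
      = (terms.count k : Int) := fun k => by
    rw [PySem.Dict.getD_foldl_insert_add_one]
    simp [PySem.Dict.getD_empty]
  simp only []
  have hf : (fun (acc : Int × Int) (p : String × Int) =>
      let c := (terms.foldl (fun d t => d.insert t (d.getD t 0 + 1)) PySem.Dict.empty).getD p.1 0
      if p.2 > 0 then (acc.1 + c * p.2, acc.2) else (acc.1, acc.2 + c * (-p.2)))
      = fun (acc : Int × Int) (p : String × Int) =>
        (acc.1 + (terms.count p.1 : Int) * (if p.2 > 0 then p.2 else 0),
         acc.2 + (terms.count p.1 : Int) * (if p.2 > 0 then 0 else -p.2)) := by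
    funext acc p
    simp only [hc]
    by_cases hv : p.2 > 0 <;> simp [hv]
  rw [hf]
  rw [PySem.List.foldl_prod_mk
      (f := fun a (p : String × Int) => a + (terms.count p.1 : Int) * (if p.2 > 0 then p.2 else 0))
      (g := fun a (p : String × Int) => a + (terms.count p.1 : Int) * (if p.2 > 0 then 0 else -p.2))]
  rw [PySem.List.foldl_add, PySem.List.foldl_add]
  simp only [zero_add, Prod.mk.injEq]
  constructor
  · refine congrArg List.sum (List.map_congr_left fun p hp => ?_)
    have := (pvAux_get afinn [] p hp).2
    unfold pvGp; rw [this]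
  · refine congrArg List.sum (List.map_congr_left fun p hp => ?_)
    have := (pvAux_get afinn [] p hp).2
    unfold pvGn; rw [this]

-- ===== VERDICT (by name: the statement is the Claim_ definition above) =====
theorem afinn_sentiment_analysis_spec : Claim_equal_afinn_sentiment_analysis := by
  intro terms afinn _
  unfold Spec_afinn_sentiment_analysis
  rw [pvA_eq_sums, pvB_eq_sums]
  have h1 := pvBridge terms ((pvDictItems afinn).map Prod.fst) (pvAux_nodup afinn [])
    (pvGp afinn) (fun k hk => by unfold pvGp; rw [pvItems_none afinn k hk])
  have h2 := pvBridge terms ((pvDictItems afinn).map Prod.fst) (pvAux_nodup afinn [])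
    (pvGn afinn) (fun k hk => by unfold pvGn; rw [pvItems_none afinn k hk])
  rw [h1, h2, List.map_map, List.map_map]
  rfl
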